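-- pv_equiv track=rewrite | github.com/superroyboy/ejemplo_python_1 | calendario_v0.py | diames
-- ===== SOURCE A (Python) =====
-- def bisiesto(A):
--     if A%4==0 and A%100!=0 or A%400==0 :
--         return 1
--     else :
--         return 0
--
-- def duracion(M,A):
--     if M==2 :
--         return 28 + bisiesto(A)
--     elif M==4 or M==6 or M==9 or M==11 :
--         return 30
--     else :
--         return 31
--
-- def dias_acumulados(M,A):
--     acum = 0
--     for m in range(1,M):
--         acum = acum + duracion (m,A)
--     return acum
--
-- def dia_semana (D,M,A) :
--     DM = dias_acumulados(M,A)
--     d = ((A-1)*365 + (A-1)//4 - ( 3*((A-1)//100+1)//4)+ DM + D) % 7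
--     if d == 0 :
--         return 6 # pasa el domingo al final de la semana
--     else :
--         return d-1 # 0:lunes, 1:martes, 2:miercoles, 3:jueves, 4:viernes, 5:sabado
--
-- def nombre_mes(M):
--     if M==1 :
--         return "Enero"
--     elif M==2 :
--         return "Febrero"
--     elif M==3 :
--         return "Marzo"
--     elif M==4 :
--         return "Abril"
--     elif M==5 :
--         return "Mayo"
--     elif M==6 :
--         return "Junio"
--     elif M==7 :
--         return "Julio"
--     elif M==8 :
--         return "Agosto"
--     elif M==9 :
--         return "Septiembre"
--     elif M==10 :
--         return "Octubre"
--     elif M==11 :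
--         return "Noviembre"
--     else : #M==12
--         return "Diciembre"
--
-- def diames(D,M,A):
--     txt = '\n '+ nombre_mes(M) + ' ' + str(A) + '\n'
--     txt = txt + ' lu  ma  mi  ju  vi  sa  do ' + '\n'
--     c = dia_semana(1,M,A)
--     txt = txt + ("    " * c )
--     for i in range(1,duracion(M,A)+1):
--         d=str(i)
--         if i < 10 :
--             d = ' ' + d
--         if i == D :
--             txt = txt + '[' + d + ']'
--         else :
--             txt = txt + ' '+ d + ' '
--         if ( i+c ) % 7 == 0 :
--             txt = txt + '\n'
--     return txt
-- ===== SOURCE B (Python) =====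
-- def bisiesto(A):
--     if A%4==0 and A%100!=0 or A%400==0 :
--         return 1
--     else :
--         return 0
--
-- def duracion(M,A):
--     if M==2 :
--         return 28 + bisiesto(A)
--     elif M==4 or M==6 or M==9 or M==11 :
--         return 30
--     else :
--         return 31
--
-- def dias_acumulados(M,A):
--     acum = 0
--     for m in range(1,M):
--         acum = acum + duracion (m,A)
--     return acum
--
-- def dia_semana (D,M,A) :
--     DM = dias_acumulados(M,A)
--     d = ((A-1)*365 + (A-1)//4 - ( 3*((A-1)//100+1)//4)+ DM + D) % 7
--     if d == 0 :
--         return 6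
--     else :
--         return d-1
--
-- def nombre_mes(M):
--     if M==1 :
--         return "Enero"
--     elif M==2 :
--         return "Febrero"
--     elif M==3 :
--         return "Marzo"
--     elif M==4 :
--         return "Abril"
--     elif M==5 :
--         return "Mayo"
--     elif M==6 :
--         return "Junio"
--     elif M==7 :
--         return "Julio"
--     elif M==8 :
--         return "Agosto"
--     elif M==9 :
--         return "Septiembre"
--     elif M==10 :
--         return "Octubre"
--     elif M==11 :
--         return "Noviembre"
--     else :
--         return "Diciembre"
--
-- def _celda(D, i):
--     d = str(i)
--     if i < 10:
--         d = ' ' + d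
--     return '[' + d + ']' if i == D else ' ' + d + ' '
--
-- def diames(D, M, A):
--     header = ('\n ' + nombre_mes(M) + ' ' + str(A) + '\n'
--               + ' lu  ma  mi  ju  vi  sa  do ' + '\n')
--     # flat grid of 4-char cells: leading blanks, then one cell per day
--     cells = ['    '] * dia_semana(1, M, A) \
--         + [_celda(D, i) for i in range(1, duracion(M, A) + 1)]
--     # render row by row: a newline after every completed row of 7 cells
--     out = ''
--     while cells:
--         chunk, cells = cells[:7], cells[7:]
--         out += ''.join(chunk)
--         if len(chunk) == 7:
--             out += '\n'
--     return header + out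
-- ===== Notes on version B (the rewrite author's own statement) =====
-- stated objective: alternative
-- what changed: B first builds a flat list of fixed-width cell strings (leading blanks, then one cell per day) and then renders it by slicing into rows of seven cells, instead of accumulating one string inside the day loop with a modular arithmetic newline test.
import Mathlib
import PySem

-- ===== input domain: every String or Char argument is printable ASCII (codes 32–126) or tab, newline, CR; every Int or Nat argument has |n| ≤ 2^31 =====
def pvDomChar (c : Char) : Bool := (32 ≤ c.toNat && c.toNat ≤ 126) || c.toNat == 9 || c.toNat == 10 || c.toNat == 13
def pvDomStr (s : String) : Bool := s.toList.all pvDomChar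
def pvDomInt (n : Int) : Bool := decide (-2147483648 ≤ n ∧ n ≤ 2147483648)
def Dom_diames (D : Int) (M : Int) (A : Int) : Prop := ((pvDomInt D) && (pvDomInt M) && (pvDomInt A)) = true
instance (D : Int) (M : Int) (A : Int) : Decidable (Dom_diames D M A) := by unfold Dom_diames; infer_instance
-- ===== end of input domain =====

-- B renders the month from a flat list of fixed-width cell strings grouped into rows of
-- seven, instead of A's single accumulator loop with a modular newline test (objective:
-- alternative decomposition; same cost).

-- ===== PORT A =====
def bisiesto (A : Int) : Int :=
  if (PySem.Int.mod A 4 == 0 && !(PySem.Int.mod A 100 == 0)) || PySem.Int.mod A 400 == 0 then 1 else 0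

def duracion (M A : Int) : Int :=
  if M == 2 then 28 + bisiesto A
  else if M == 4 || M == 6 || M == 9 || M == 11 then 30
  else 31

def diasAcumulados (M A : Int) : Int :=
  (PySem.List.pyRange 1 M 1).foldl (fun acum m => acum + duracion m A) 0

def diaSemana (D M A : Int) : Int :=
  let DM := diasAcumulados M A
  let d := PySem.Int.mod ((A-1)*365 + PySem.Int.floordiv (A-1) 4
            - PySem.Int.floordiv (3*(PySem.Int.floordiv (A-1) 100 + 1)) 4 + DM + D) 7
  if d == 0 then 6 else d - 1

def nombreMes (M : Int) : String :=
  if M == 1 then "Enero"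
  else if M == 2 then "Febrero"
  else if M == 3 then "Marzo"
  else if M == 4 then "Abril"
  else if M == 5 then "Mayo"
  else if M == 6 then "Junio"
  else if M == 7 then "Julio"
  else if M == 8 then "Agosto"
  else if M == 9 then "Septiembre"
  else if M == 10 then "Octubre"
  else if M == 11 then "Noviembre"
  else "Diciembre"

-- Python's s * n on strings (n ≤ 0 gives ""): exact hand port, PySem has no string-repeat
def strMul (s : String) (n : Int) : String := PySem.Str.join "" (List.replicate n.toNat s)

def diames (D : Int) (M : Int) (A : Int) : String :=
  let txt := "\n " ++ nombreMes M ++ " " ++ PySem.Int.toStr A ++ "\n"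
  let txt := txt ++ " lu  ma  mi  ju  vi  sa  do " ++ "\n"
  let c := diaSemana 1 M A
  let txt := txt ++ strMul "    " c
  (PySem.List.pyRange 1 (duracion M A + 1) 1).foldl (fun txt i =>
    let d := PySem.Int.toStr i
    let d := if i < 10 then " " ++ d else d
    let txt := if i == D then txt ++ "[" ++ d ++ "]" else txt ++ " " ++ d ++ " "
    if PySem.Int.mod (i + c) 7 == 0 then txt ++ "\n" else txt) txt

-- ===== PORT B =====
def celda (D i : Int) : String :=
  let d := PySem.Int.toStr i
  let d := if i < 10 then " " ++ d else d
  if i == D then "[" ++ d ++ "]" else " " ++ d ++ " "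

-- the while loop of Source B: consume seven cells at a time, newline after each full row
def chunkRender (ws : List String) : String :=
  if h : ws = [] then ""
  else
    PySem.Str.join "" (ws.take 7) ++ (if (ws.take 7).length = 7 then "\n" else "")
      ++ chunkRender (ws.drop 7)
termination_by ws.length
decreasing_by
  have : 0 < ws.length := List.length_pos_of_ne_nil h
  simp [List.length_drop]; omega

def diames_alt (D : Int) (M : Int) (A : Int) : String :=
  let header := "\n " ++ nombreMes M ++ " " ++ PySem.Int.toStr A ++ "\n"
                 ++ " lu  ma  mi  ju  vi  sa  do " ++ "\n"
  let cells := List.replicate (diaSemana 1 M A).toNat "    "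
                 ++ (PySem.List.pyRange 1 (duracion M A + 1) 1).map (celda D)
  header ++ chunkRender cells

-- ===== PRECONDITION & SPEC =====
def Spec_diames (D : Int) (M : Int) (A : Int) (out : String) : Prop := out = diames_alt D M A
instance (D : Int) (M : Int) (A : Int) (out : String) : Decidable (Spec_diames D M A out) := by unfold Spec_diames; infer_instance

-- ===== CLAIM (what is proved, stated in full; the proofs are below) =====
def Claim_equal_diames : Prop := ∀ (D : Int) (M : Int) (A : Int), Dom_diames D M A → Spec_diames D M A (diames D M A)

-- ===== LEMMAS AND PROOFS =====

-- the common rendering spec: emit cells left to right, a newline after every 7th position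
def emitC : List String → Nat → String
  | [], _ => ""
  | w :: ws, j => w ++ (if (j+1) % 7 = 0 then "\n" else "") ++ emitC ws (j+1)

theorem join_empty_nil : PySem.Str.join "" ([] : List String) = "" := by
  simp [PySem.Str.join, PySem.Chars.join, List.intercalate]

theorem join_empty_cons (w : String) (ws : List String) :
    PySem.Str.join "" (w :: ws) = w ++ PySem.Str.join "" ws := by
  cases ws with
  | nil => simp [PySem.Str.join, PySem.Chars.join, List.intercalate]
  | cons b t => simp [PySem.Str.join, PySem.Chars.join_cons_cons]

theorem join_empty_append (xs ys : List String) :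
    PySem.Str.join "" (xs ++ ys) = PySem.Str.join "" xs ++ PySem.Str.join "" ys := by
  induction xs with
  | nil => simp [join_empty_nil]
  | cons a t ih => simp [join_empty_cons, ih, String.append_assoc]

theorem emitC_append (ws vs : List String) (j : Nat) :
    emitC (ws ++ vs) j = emitC ws j ++ emitC vs (j + ws.length) := by
  induction ws generalizing j with
  | nil => simp [emitC]
  | cons w t ih =>
      simp [emitC, ih (j+1), String.append_assoc]
      ring_nf

theorem emitC_add_seven (ws : List String) (j : Nat) : emitC ws (j + 7) = emitC ws j := by
  induction ws generalizing j with
  | nil => simp [emitC]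
  | cons w t ih =>
      have h7 : (j + 7 + 1) % 7 = (j + 1) % 7 := by omega
      have h8 : j + 7 + 1 = j + 1 + 7 := by omega
      simp [emitC, h7, h8, ih (j + 1)]

theorem emitC_no7 (ws : List String) (j : Nat)
    (h : ∀ k, k < ws.length → (j + k + 1) % 7 ≠ 0) :
    emitC ws j = PySem.Str.join "" ws := by
  induction ws generalizing j with
  | nil => simp [emitC, join_empty_nil]
  | cons w t ih =>
      have h0 : (j + 1) % 7 ≠ 0 := by
        have := h 0 (by simp); simpa using this
      have ht : ∀ k, k < t.length → (j + 1 + k + 1) % 7 ≠ 0 := by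
        intro k hk
        have := h (k+1) (by simp; omega)
        omega
      simp [emitC, h0, join_empty_cons, ih (j+1) ht]

theorem emitC_full7 (t : List String) (ht : t.length = 7) :
    emitC t 0 = PySem.Str.join "" t ++ "\n" := by
  have hne : t ≠ [] := by intro h; simp [h] at ht
  have hsplit : t.dropLast ++ [t.getLast hne] = t := List.dropLast_append_getLast hne
  have hlen : t.dropLast.length = 6 := by simp [ht]
  rw [← hsplit, emitC_append, hlen]
  rw [emitC_no7 t.dropLast 0 (by intro k hk; rw [hlen] at hk; omega)]
  simp [emitC, join_empty_append, join_empty_cons, join_empty_nil, String.append_assoc]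

theorem chunkRender_eq_emitC : ∀ (n : Nat) (ws : List String), ws.length ≤ n →
    chunkRender ws = emitC ws 0 := by
  intro n
  induction n with
  | zero =>
      intro ws h
      have : ws = [] := List.eq_nil_of_length_eq_zero (by omega)
      subst this; rw [chunkRender]; simp [emitC]
  | succ n ih =>
      intro ws h
      by_cases hnil : ws = []
      · subst hnil; rw [chunkRender]; simp [emitC]
      · rw [chunkRender]; simp only [hnil, dite_false]
        have hlenpos : 0 < ws.length := List.length_pos_of_ne_nil hnil
        have hws : ws.take 7 ++ ws.drop 7 = ws := List.take_append_drop 7 ws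
        by_cases h7 : 7 ≤ ws.length
        · have htl : (ws.take 7).length = 7 := by simp [List.length_take]; omega
          have hdl : (ws.drop 7).length ≤ n := by simp [List.length_drop]; omega
          rw [ih (ws.drop 7) hdl]
          conv_rhs => rw [← hws]
          rw [emitC_append, htl, emitC_full7 _ htl]
          have h70 : emitC (ws.drop 7) 7 = emitC (ws.drop 7) 0 := by
            simpa using emitC_add_seven (ws.drop 7) 0
          rw [h70]
          simp [String.append_assoc]
        · have hlt : ws.length < 7 := by omega
          have htake : ws.take 7 = ws := List.take_of_length_le (by omega)
          have hdrop : ws.drop 7 = [] := List.drop_eq_nil_of_le (by omega)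
          rw [htake, hdrop, emitC_no7 ws 0 (by intro k hk; omega), chunkRender]
          simp [show ws.length ≠ 7 from by omega]

-- A's accumulator loop over the days equals emitC of the mapped cells, offset by c
theorem foldA_eq_emitC (D c : Int) (hc : 0 ≤ c) : ∀ (n : Nat) (txt : String),
    (PySem.List.pyRange 1 ((n : Int) + 1) 1).foldl (fun txt i =>
      let d := PySem.Int.toStr i
      let d := if i < 10 then " " ++ d else d
      let txt := if i == D then txt ++ "[" ++ d ++ "]" else txt ++ " " ++ d ++ " "
      if PySem.Int.mod (i + c) 7 == 0 then txt ++ "\n" else txt) txt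
    = txt ++ emitC ((PySem.List.pyRange 1 ((n : Int) + 1) 1).map (celda D)) c.toNat := by
  intro n
  induction n with
  | zero =>
      intro txt
      rw [PySem.List.pyRange_one_eq_nil (by omega)]
      simp [emitC]
  | succ n ih =>
      intro txt
      have hsplit : PySem.List.pyRange 1 (((n : Nat) + 1 : Nat) + 1 : Int) 1
          = PySem.List.pyRange 1 ((n : Int) + 1) 1 ++ [(n : Int) + 1] := by
        push_cast
        exact PySem.List.pyRange_one_succ_right (by omega)
      rw [hsplit, List.foldl_append, List.map_append, ih, emitC_append]
      have hlen : ((PySem.List.pyRange 1 ((n : Int) + 1) 1).map (celda D)).length = n := by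
        simp [PySem.List.length_pyRange_one]
      rw [hlen]
      -- the one remaining loop iteration, i = n + 1
      have hcell : ∀ t : String,
          (if ((n : Int) + 1) == D then t ++ "[" ++ (if ((n : Int) + 1) < 10 then " " ++ PySem.Int.toStr ((n : Int) + 1) else PySem.Int.toStr ((n : Int) + 1)) ++ "]"
           else t ++ " " ++ (if ((n : Int) + 1) < 10 then " " ++ PySem.Int.toStr ((n : Int) + 1) else PySem.Int.toStr ((n : Int) + 1)) ++ " ")
          = t ++ celda D ((n : Int) + 1) := by
        intro t
        simp only [celda]
        split <;> simp [String.append_assoc]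
      have hcast : (n : Int) + 1 + c = ((c.toNat + n + 1 : Nat) : Int) := by
        have h := Int.toNat_of_nonneg hc
        push_cast
        omega
      have hcond : (PySem.Int.mod ((n : Int) + 1 + c) 7 = 0) ↔ ((c.toNat + n + 1) % 7 = 0) := by
        rw [hcast, show ((7 : Int)) = ((7 : Nat) : Int) from rfl, PySem.Int.mod_natCast]
        exact_mod_cast Iff.rfl
      have hdvd : ((7 : Int) ∣ ((n : Int) + 1 + c)) ↔ ((c.toNat + n + 1) % 7 = 0) := by
        rw [← PySem.Int.mod_eq_zero_iff_dvd]; exact hcond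
      simp only [List.foldl_cons, List.foldl_nil]
      rw [hcell]
      by_cases hz : (c.toNat + n + 1) % 7 = 0
      · simp [emitC, beq_iff_eq, hdvd, hz, String.append_assoc]
      · simp [emitC, beq_iff_eq, hdvd, hz, String.append_assoc]

theorem diaSemana_bounds (M A : Int) : 0 ≤ diaSemana 1 M A ∧ diaSemana 1 M A ≤ 6 := by
  have key : ∀ y : Int,
      0 ≤ (if (PySem.Int.mod y 7 == 0) = true then (6 : Int) else PySem.Int.mod y 7 - 1)
      ∧ (if (PySem.Int.mod y 7 == 0) = true then (6 : Int) else PySem.Int.mod y 7 - 1) ≤ 6 := by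
    intro y
    have h0 : 0 ≤ PySem.Int.mod y 7 := PySem.Int.mod_nonneg y (by norm_num)
    have h1 : PySem.Int.mod y 7 < 7 := PySem.Int.mod_lt y (by norm_num)
    by_cases h : (7 : Int) ∣ y
    · simp [h]
    · simp [h]; omega
  exact key _

theorem bisiesto_nonneg (A : Int) : 0 ≤ bisiesto A := by
  unfold bisiesto; split <;> norm_num

theorem duracion_nonneg (M A : Int) : 0 ≤ duracion M A := by
  have hb := bisiesto_nonneg A
  unfold duracion
  split
  · omega
  · split <;> norm_num

theorem diames_eq (D M A : Int) : diames D M A = diames_alt D M A := by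
  unfold diames diames_alt
  simp only []
  set c := diaSemana 1 M A with hcdef
  obtain ⟨hc0, hc6⟩ := diaSemana_bounds M A
  set hdr := "\n " ++ nombreMes M ++ " " ++ PySem.Int.toStr A ++ "\n"
              ++ " lu  ma  mi  ju  vi  sa  do " ++ "\n" with hhdr
  have hN : duracion M A = (((duracion M A).toNat : Nat) : Int) := by
    exact (Int.toNat_of_nonneg (duracion_nonneg M A)).symm
  rw [hN, foldA_eq_emitC D c hc0 (duracion M A).toNat]
  -- B side
  have hcells := emitC_append (List.replicate c.toNat "    ")
      ((PySem.List.pyRange 1 ((((duracion M A).toNat : Nat) : Int) + 1) 1).map (celda D)) 0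
  rw [chunkRender_eq_emitC (List.replicate c.toNat "    "
        ++ (PySem.List.pyRange 1 ((((duracion M A).toNat : Nat) : Int) + 1) 1).map (celda D)).length _ le_rfl]
  rw [hcells]
  have hblank : emitC (List.replicate c.toNat "    ") 0
      = PySem.Str.join "" (List.replicate c.toNat "    ") := by
    apply emitC_no7
    intro k hk
    simp [List.length_replicate] at hk
    omega
  rw [hblank]
  simp only [List.length_replicate, Nat.zero_add]
  rw [show strMul "    " c = PySem.Str.join "" (List.replicate c.toNat "    ") from rfl]
  simp [String.append_assoc]

-- ===== VERDICT (by name: the statement is the Claim_ definition above) =====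
theorem diames_spec : Claim_equal_diames := by
  intro D M A _
  unfold Spec_diames
  exact diames_eq D M A
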